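-- pv_equiv track=rewrite | github.com/devgin23/masterCote | Programmers/binIteration.py | solution
-- ===== SOURCE A (Python) =====
-- def solution(s):
--     answer = []
--     sList = list(s)
--     cnt = 0
--     cnt1st = 0
--     prt = ''
--     while prt != '1':
--         for i in range(len(sList)):
--             if '0' in sList:
--                 sList.remove('0')
--                 cnt += 1
--         prt = str(format(len(sList), 'b'))
--         sList = list(prt)
--         cnt1st += 1
--     answer.append(cnt1st)
--     answer.append(cnt)
--     return answer
-- ===== SOURCE B (Python) =====
-- def solution(s):
--     zeros = s.count('0')
--     n = len(s) - zeros
--     steps = 1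
--     while n != 1:
--         b = format(n, 'b')
--         z = b.count('0')
--         zeros += z
--         n = len(b) - z
--         steps += 1
--     return [steps, zeros]
-- ===== Notes on version B (the rewrite author's own statement) =====
-- stated objective: faster
-- what changed: B replaces A's quadratic inner pass of repeated list.remove('0') (a linear scan per removed zero, re-run every step) by counting '0' characters of the current binary string once per step and keeping only the integer number of remaining ones.
import Mathlib
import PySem

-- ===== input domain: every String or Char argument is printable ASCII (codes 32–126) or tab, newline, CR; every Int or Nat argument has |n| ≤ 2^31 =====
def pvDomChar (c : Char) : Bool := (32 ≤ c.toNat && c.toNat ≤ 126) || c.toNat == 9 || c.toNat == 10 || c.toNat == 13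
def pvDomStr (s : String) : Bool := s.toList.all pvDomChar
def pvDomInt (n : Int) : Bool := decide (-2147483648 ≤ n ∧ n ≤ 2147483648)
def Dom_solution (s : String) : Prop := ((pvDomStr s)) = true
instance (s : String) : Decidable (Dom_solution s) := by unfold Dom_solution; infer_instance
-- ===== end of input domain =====

-- B replaces A's repeated list.remove('0') passes by per-step character counting
-- (zeros removed per step = count of '0' in the current binary string); objective: faster.
-- Strings inside the loops are carried as List Char per the PySem convention.

-- ===== PORT A =====
-- body of A's inner `for i in range(len(sList)): if '0' in sList: sList.remove('0'); cnt += 1`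
-- (remove? is some here because membership is checked first, so getD is exact)
def solInner (st : List Char × Int) : List Char × Int :=
  if '0' ∈ st.1 then ((PySem.List.remove? st.1 '0').getD st.1, st.2 + 1) else st

def solPass (l : List Char) (cnt : Int) : List Char × Int :=
  (List.range l.length).foldl (fun st _ => solInner st) (l, cnt)

-- the `while prt != '1'` loop; fuel (never exhausted on Pre_ inputs) makes it structural
def solLoopA (fuel : Nat) (sList : List Char) (cnt cnt1st : Int) (prt : List Char) : Int × Int :=
  if prt = ['1'] then (cnt1st, cnt)
  else match fuel with
  | 0 => (cnt1st, cnt)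
  | f + 1 =>
    let p := solPass sList cnt
    let prt' := PySem.Int.toBinChars (p.1.length : Int)   -- format(len(sList), 'b')
    solLoopA f prt' p.2 (cnt1st + 1) prt'

def solution (s : String) : List Int :=
  let r := solLoopA (s.toList.length + 2) s.toList 0 0 []
  [r.1, r.2]

-- ===== PORT B =====
-- `while n != 1:` of Source B, with the same fuel device
def solAltLoop (fuel : Nat) (steps zeros : Int) (n : Nat) : Int × Int :=
  match fuel with
  | 0 => (steps, zeros)
  | f + 1 =>
    if n = 1 then (steps, zeros)
    else
      let b := PySem.Int.toBinChars (n : Int)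
      let z := b.count '0'
      solAltLoop f (steps + 1) (zeros + (z : Int)) (b.length - z)

def solution_alt (s : String) : List Int :=
  let zeros := s.toList.count '0'
  let n := s.toList.length - zeros
  let r := solAltLoop (s.toList.length + 1) 1 (zeros : Int) n
  [r.1, r.2]

-- ===== PRECONDITION & SPEC =====
-- Pre_ excludes strings consisting only of '0' characters (including ""): there A's
-- while-loop never terminates (len stays 0, format(0,'b') = '0' forever), and B's loop
-- diverges the same way; A returns on every other input.
def Pre_solution (s : String) : Prop := (s.toList.any (fun c => !(c == '0'))) = true
instance (s : String) : Decidable (Pre_solution s) := by unfold Pre_solution; infer_instance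
def pvWitness_solution : String := "1101"

def Spec_solution (s : String) (out : List Int) : Prop := out = solution_alt s
instance (s : String) (out : List Int) : Decidable (Spec_solution s out) := by unfold Spec_solution; infer_instance

-- ===== CLAIM (what is proved, stated in full; the proofs are below) =====
def Claim_equal_solution : Prop := ∀ (s : String), Dom_solution s → Pre_solution s → Spec_solution s (solution s)

-- ===== LEMMAS AND PROOFS =====

-- erasing one '0' does not change the non-'0' characters
lemma filter_erase_zero (l : List Char) :
    (l.erase '0').filter (· ≠ '0') = l.filter (· ≠ '0') := by
  induction l with
  | nil => rfl
  | cons c t ih =>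
    by_cases h : c = '0'
    · subst h; simp [List.erase_cons_head]
    · rw [List.erase_cons_tail (by simpa using h)]
      simp only [List.filter_cons, ih]

lemma length_filter_add_count (l : List Char) :
    (l.filter (· ≠ '0')).length + l.count '0' = l.length := by
  induction l with
  | nil => rfl
  | cons c t ih =>
    simp only [decide_not] at ih ⊢
    by_cases h : c = '0' <;> simp [h] <;> omega

-- A's inner pass removes exactly the '0's, counting them
lemma pass_aux : ∀ (k : Nat) (l : List Char) (cnt : Int), l.count '0' ≤ k →
    (List.range k).foldl (fun st _ => solInner st) (l, cnt)
      = (l.filter (· ≠ '0'), cnt + (l.count '0' : Int)) := by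
  intro k
  induction k with
  | zero =>
    intro l cnt h
    have h0 : '0' ∉ l := by
      rw [← List.count_eq_zero]; omega
    have hf : l.filter (· ≠ '0') = l :=
      List.filter_eq_self.mpr (fun a ha => by
        simp only [decide_eq_true_eq]; rintro rfl; exact h0 ha)
    rw [List.range_zero, List.foldl_nil, hf, List.count_eq_zero.mpr h0]
    simp
  | succ k ih =>
    intro l cnt h
    rw [List.range_succ_eq_map, List.foldl_cons, List.foldl_map]
    by_cases hm : '0' ∈ l
    · have hc1 : 1 ≤ l.count '0' := List.count_pos_iff.mpr hm
      have hstep : solInner (l, cnt) = (l.erase '0', cnt + 1) := by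
        simp only [solInner, if_pos hm,
          PySem.List.remove?_eq_some_erase l '0' hm, Option.getD_some]
      rw [hstep, ih _ _ (by rw [List.count_erase_self]; omega)]
      rw [filter_erase_zero, List.count_erase_self]
      have : (cnt + 1) + ((l.count '0' - 1 : Nat) : Int) = cnt + (l.count '0' : Int) := by
        push_cast [Nat.cast_sub hc1]; ring
      rw [this]
    · have hstep : solInner (l, cnt) = (l, cnt) := by simp [solInner, hm]
      rw [hstep, ih _ _ (by rw [List.count_eq_zero.mpr hm]; exact Nat.zero_le k)]

lemma solPass_eq (l : List Char) (cnt : Int) :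
    solPass l cnt = (l.filter (· ≠ '0'), cnt + (l.count '0' : Int)) :=
  pass_aux l.length l cnt (List.count_le_length)

-- canonical form of the base-2 digit string (proof-side only)
def binAux : Nat → List Char
  | 0 => []
  | m + 1 => binAux ((m + 1) / 2) ++ [Nat.digitChar ((m + 1) % 2)]
decreasing_by exact Nat.div_lt_self (Nat.succ_pos m) (by omega)

lemma binAux_eq (m : Nat) (h : 1 ≤ m) :
    binAux m = (if m / 2 = 0 then [] else binAux (m / 2)) ++ [Nat.digitChar (m % 2)] := by
  obtain ⟨m', rfl⟩ := Nat.exists_eq_add_of_le h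
  rw [show 1 + m' = m' + 1 by omega, binAux]
  by_cases h2 : (m' + 1) / 2 = 0
  · rw [h2]; simp [binAux]
  · rw [if_neg h2]

lemma toDigitsCore_eq_binAux : ∀ (f m : Nat) (ds : List Char), m < f →
    Nat.toDigitsCore 2 f m ds = (if m = 0 then ['0'] else binAux m) ++ ds := by
  intro f
  induction f with
  | zero => intro m ds h; omega
  | succ f ih =>
    intro m ds h
    by_cases h0 : m = 0
    · subst h0
      simp [Nat.toDigitsCore]
      decide
    · have h1 : 1 ≤ m := by omega
      rw [if_neg h0, binAux_eq m h1]
      by_cases h2 : m / 2 = 0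
      · simp only [Nat.toDigitsCore, h2]
        simp
      · simp only [Nat.toDigitsCore, if_neg h2]
        rw [ih (m / 2) _ (by omega), if_neg h2]
        simp

lemma toBinChars_eq_binAux (n : Nat) (h : 1 ≤ n) :
    PySem.Int.toBinChars (n : Int) = binAux n := by
  have : PySem.Int.toBinChars (n : Int) = Nat.toDigits 2 n := by
    simp [PySem.Int.toBinChars]
  rw [this, Nat.toDigits, toDigitsCore_eq_binAux (n + 1) n [] (by omega),
    if_neg (by omega), List.append_nil]

-- the binary digit string of n ≥ 1 starts with '1'
lemma binAux_head : ∀ n : Nat, 1 ≤ n → ∃ l, binAux n = '1' :: l := by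
  intro n
  induction n using Nat.strong_induction_on with
  | _ n ih =>
    intro h1
    by_cases h : n = 1
    · exact ⟨[], by subst h; rw [binAux_eq 1 (by omega)]; rfl⟩
    · have h2 : 2 ≤ n := by omega
      have hd2 : ¬ n / 2 = 0 := by omega
      obtain ⟨l, hl⟩ := ih (n / 2) (Nat.div_lt_self (by omega) (by omega)) (by omega)
      exact ⟨l ++ [Nat.digitChar (n % 2)], by
        rw [binAux_eq n (by omega), if_neg hd2, hl]; rfl⟩

lemma binAux_ne_one (n : Nat) (h : 2 ≤ n) : binAux n ≠ ['1'] := by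
  have hd2 : ¬ n / 2 = 0 := by omega
  obtain ⟨l, hl⟩ := binAux_head (n / 2) (by omega)
  rw [binAux_eq n (by omega), if_neg hd2, hl]
  intro hc
  have := congrArg List.length hc
  simp at this

-- one unfolding step of each loop
lemma loopA_step (f : Nat) (sList l' : List Char) (cnt cnt' c1 : Int) (prt : List Char)
    (h : prt ≠ ['1']) (hp : solPass sList cnt = (l', cnt')) :
    solLoopA (f + 1) sList cnt c1 prt
      = solLoopA f (PySem.Int.toBinChars (l'.length : Int)) cnt' (c1 + 1)
          (PySem.Int.toBinChars (l'.length : Int)) := by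
  rw [solLoopA, if_neg h, hp]

lemma loopA_one (f : Nat) (cnt c1 : Int) :
    solLoopA f ['1'] cnt c1 ['1'] = (c1, cnt) := by
  rw [solLoopA.eq_def, if_pos rfl]

lemma altLoop_step (f : Nat) (steps zeros : Int) (n : Nat) (hn : n ≠ 1) :
    solAltLoop (f + 1) steps zeros n
      = solAltLoop f (steps + 1)
          (zeros + (((PySem.Int.toBinChars (n : Int)).count '0' : Nat) : Int))
          ((PySem.Int.toBinChars (n : Int)).length
            - (PySem.Int.toBinChars (n : Int)).count '0') := by
  rw [solAltLoop, if_neg hn]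

-- the two loops agree whenever A's list is the binary digit string of B's n ≥ 1
lemma loop_eq : ∀ (fuel n : Nat) (cnt c1 : Int), 1 ≤ n →
    solLoopA fuel (PySem.Int.toBinChars (n : Int)) cnt c1 (PySem.Int.toBinChars (n : Int))
      = solAltLoop fuel c1 cnt n := by
  intro fuel
  induction fuel with
  | zero =>
    intro n cnt c1 _
    rw [solAltLoop]
    rw [solLoopA]
    split <;> rfl
  | succ f ih =>
    intro n cnt c1 h1
    by_cases hn : n = 1
    · subst hn
      have hb : PySem.Int.toBinChars (((1 : Nat)) : Int) = ['1'] := by decide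
      rw [hb, loopA_one, solAltLoop, if_pos rfl]
    · have h2 : 2 ≤ n := by omega
      have hbin : PySem.Int.toBinChars (n : Int) = binAux n := toBinChars_eq_binAux n (by omega)
      have hne : PySem.Int.toBinChars (n : Int) ≠ ['1'] := by
        rw [hbin]; exact binAux_ne_one n h2
      have hmem1 : '1' ∈ (PySem.Int.toBinChars (n : Int)).filter (· ≠ '0') := by
        obtain ⟨l, hl⟩ := binAux_head n (by omega)
        rw [hbin, hl]
        simp
      have hpos : 0 < ((PySem.Int.toBinChars (n : Int)).filter (· ≠ '0')).length :=
        List.length_pos_of_mem hmem1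
      have hlen : ((PySem.Int.toBinChars (n : Int)).filter (· ≠ '0')).length
          = (PySem.Int.toBinChars (n : Int)).length
            - (PySem.Int.toBinChars (n : Int)).count '0' := by
        have := length_filter_add_count (PySem.Int.toBinChars (n : Int))
        omega
      rw [loopA_step f _ _ cnt _ c1 _ hne (solPass_eq (PySem.Int.toBinChars (n : Int)) cnt),
        altLoop_step f c1 cnt n hn, ← hlen]
      exact ih _ _ _ hpos

-- ===== VERDICT (by name: the statement is the Claim_ definition above) =====
theorem solution_spec : Claim_equal_solution := by
  intro s _ hp
  unfold Spec_solution solution solution_alt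
  have h1 : 0 < (s.toList.filter (· ≠ '0')).length := by
    unfold Pre_solution at hp
    rw [List.any_eq_true] at hp
    obtain ⟨c, hc, hne⟩ := hp
    exact List.length_pos_of_mem (List.mem_filter.mpr ⟨hc, by simpa using hne⟩)
  have hn0 : (s.toList.filter (· ≠ '0')).length
      = s.toList.length - s.toList.count '0' := by
    have := length_filter_add_count s.toList
    omega
  have hX : solLoopA (s.toList.length + 1 + 1) s.toList 0 0 []
      = solAltLoop (s.toList.length + 1) 1 (s.toList.count '0' : Int)
          (s.toList.length - s.toList.count '0') := by
    rw [loopA_step _ _ _ _ _ _ _ (by decide) (solPass_eq s.toList 0), zero_add, hn0]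
    exact loop_eq _ _ _ _ (by omega)
  rw [show s.toList.length + 2 = s.toList.length + 1 + 1 from rfl, hX]
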